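-- pv_equiv track=rewrite | github.com/jonusHK/algorithm_data_structure | dp/dp_42.py | solution
-- ===== SOURCE A (Python) =====
-- def solution(n):
--
--     if n in (0, 1, 2):
--         return n
--
--     dp = [0] * (n + 1)
--
--     dp[1] = 1
--     dp[2] = 2
--     dp[3] = 4
--
--     for i in range(4, n + 1):
--         dp[i] = (dp[i-3] + dp[i-2] + dp[i-1]) % 1000000009
--
--     return dp[n]
-- ===== SOURCE B (Python) =====
-- def solution(n):
--     MOD = 1000000009
--     if n in (0, 1, 2):
--         return n
--
--     def mul(A, B):
--         return [[(A[i][0]*B[0][j] + A[i][1]*B[1][j] + A[i][2]*B[2][j]) % MOD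
--                  for j in range(3)] for i in range(3)]
--
--     def mat_pow(M, e):
--         R = [[1, 0, 0], [0, 1, 0], [0, 0, 1]]
--         while e:
--             if e & 1:
--                 R = mul(R, M)
--             M = mul(M, M)
--             e >>= 1
--         return R
--
--     T = [[1, 1, 1], [1, 0, 0], [0, 1, 0]]
--     P = mat_pow(T, n - 3)
--     return (4 * P[0][0] + 2 * P[0][1] + P[0][2]) % MOD
-- ===== Notes on version B (the rewrite author's own statement) =====
-- stated objective: faster
-- what changed: Replaces A's linear dp-array recurrence loop by binary exponentiation of the three-by-three companion matrix of the recurrence under the same prime modulus, reading the answer off the top row.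
-- outside the precondition, e.g. on solution(-2): A raises IndexError, B does not finish within the time limit
import Mathlib
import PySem

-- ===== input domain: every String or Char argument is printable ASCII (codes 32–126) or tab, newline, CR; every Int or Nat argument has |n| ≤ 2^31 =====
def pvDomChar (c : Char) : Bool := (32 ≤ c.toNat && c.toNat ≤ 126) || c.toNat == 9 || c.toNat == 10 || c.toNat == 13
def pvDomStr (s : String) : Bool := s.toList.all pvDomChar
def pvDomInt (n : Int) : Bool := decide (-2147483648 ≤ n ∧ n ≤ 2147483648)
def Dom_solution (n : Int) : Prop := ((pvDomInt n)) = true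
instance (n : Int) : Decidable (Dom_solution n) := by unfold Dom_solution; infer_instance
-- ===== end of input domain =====

-- B replaces A's O(n) dp-array loop by binary matrix exponentiation of the 3-term
-- recurrence (O(log n)); measured faster on large n.

-- ===== PORT A =====
-- '%' below is Lean's Int.emod: exact for Python '%' since the divisor 1000000009 > 0.
-- pyGetD/pySetD are the total forms of dp[i] read/write; all indices are in range under Pre_.
def solution (n : Int) : Int :=
  if n = 0 ∨ n = 1 ∨ n = 2 then n
  else
    let dp := List.replicate (n + 1).toNat (0 : Int)
    let dp := PySem.List.pySetD dp 1 1
    let dp := PySem.List.pySetD dp 2 2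
    let dp := PySem.List.pySetD dp 3 4
    let dp := (PySem.List.pyRange 4 (n + 1) 1).foldl
      (fun dp i =>
        PySem.List.pySetD dp i
          ((PySem.List.pyGetD dp (i - 3) 0 + PySem.List.pyGetD dp (i - 2) 0 +
              PySem.List.pyGetD dp (i - 1) 0) % 1000000009)) dp
    PySem.List.pyGetD dp n 0

-- ===== PORT B =====
structure M3 where
  a : Int
  b : Int
  c : Int
  d : Int
  e : Int
  f : Int
  g : Int
  h : Int
  i : Int
deriving DecidableEq, Repr

-- Source B's mul: 3×3 product with each entry reduced mod 1000000009
def mmul (x y : M3) : M3 :=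
  ⟨(x.a*y.a + x.b*y.d + x.c*y.g) % 1000000009,
   (x.a*y.b + x.b*y.e + x.c*y.h) % 1000000009,
   (x.a*y.c + x.b*y.f + x.c*y.i) % 1000000009,
   (x.d*y.a + x.e*y.d + x.f*y.g) % 1000000009,
   (x.d*y.b + x.e*y.e + x.f*y.h) % 1000000009,
   (x.d*y.c + x.e*y.f + x.f*y.i) % 1000000009,
   (x.g*y.a + x.h*y.d + x.i*y.g) % 1000000009,
   (x.g*y.b + x.h*y.e + x.i*y.h) % 1000000009,
   (x.g*y.c + x.h*y.f + x.i*y.i) % 1000000009⟩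

-- Source B's mat_pow loop (while e: if e&1: R = R*M; M = M*M; e >>= 1) as recursion on the
-- exponent; Source B's int e is nonnegative under Pre_, here a Nat.
def matPowAux (R A : M3) : ℕ → M3
  | 0 => R
  | (e+1) => matPowAux (if (e+1) % 2 = 1 then mmul R A else R) (mmul A A) ((e+1) / 2)
decreasing_by exact Nat.div_lt_self (Nat.succ_pos e) (by norm_num)

def solution_alt (n : Int) : Int :=
  if n = 0 ∨ n = 1 ∨ n = 2 then n
  else
    let T : M3 := ⟨1,1,1,1,0,0,0,1,0⟩
    let P := matPowAux ⟨1,0,0,0,1,0,0,0,1⟩ T (n - 3).toNat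
    (4 * P.a + 2 * P.b + P.c) % 1000000009

-- ===== PRECONDITION & SPEC =====
-- Pre_ excludes negative n: there A raises IndexError (the dp list is empty) and B's
-- while-loop on the negative exponent does not terminate.
def Pre_solution (n : Int) : Prop := 0 ≤ n
instance (n : Int) : Decidable (Pre_solution n) := by unfold Pre_solution; infer_instance
def pvWitness_solution : Int := 7

def Spec_solution (n : Int) (out : Int) : Prop := out = solution_alt n
instance (n : Int) (out : Int) : Decidable (Spec_solution n out) := by unfold Spec_solution; infer_instance

-- ===== CLAIM (what is proved, stated in full; the proofs are below) =====
def Claim_equal_solution : Prop := ∀ (n : Int), Dom_solution n → Pre_solution n → Spec_solution n (solution n)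

-- ===== LEMMAS AND PROOFS =====

-- the mathematical sequence both programs compute
def fseq : ℕ → Int
  | 0 => 0
  | 1 => 1
  | 2 => 2
  | 3 => 4
  | (k+4) => (fseq (k+1) + fseq (k+2) + fseq (k+3)) % 1000000009

lemma fseq_nonneg (k : ℕ) (hk : 1 ≤ k) : 0 ≤ fseq k := by
  match k, hk with
  | 1, _ => decide
  | 2, _ => decide
  | 3, _ => decide
  | (k+4), _ => exact Int.emod_nonneg _ (by norm_num)

lemma fseq_lt (k : ℕ) (hk : 1 ≤ k) : fseq k < 1000000009 := by
  match k, hk with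
  | 1, _ => decide
  | 2, _ => decide
  | 3, _ => decide
  | (k+4), _ => exact Int.emod_lt_of_pos _ (by norm_num)

-- ---------- A side ----------

-- the loop body of A
def stepA (dp : List Int) (i : Int) : List Int :=
  PySem.List.pySetD dp i
    ((PySem.List.pyGetD dp (i - 3) 0 + PySem.List.pyGetD dp (i - 2) 0 +
        PySem.List.pyGetD dp (i - 1) 0) % 1000000009)

-- A's dp array after processing indices 4 .. 3+j, for a fixed size N+1
def dpAux (N : ℕ) : ℕ → List Int
  | 0 => PySem.List.pySetD (PySem.List.pySetD (PySem.List.pySetD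
          (List.replicate (N + 1) (0 : Int)) 1 1) 2 2) 3 4
  | (j+1) => stepA (dpAux N j) ((4 + j : ℕ) : Int)

lemma foldl_stepA (N : ℕ) (j : ℕ) :
    (PySem.List.pyRange 4 (4 + (j : Int)) 1).foldl stepA (dpAux N 0) = dpAux N j := by
  induction j with
  | zero => simp [PySem.List.pyRange_one_eq_nil]
  | succ j ih =>
      have h : (4 + ((j+1 : ℕ) : Int)) = (4 + (j:Int)) + 1 := by push_cast; ring
      rw [h, PySem.List.pyRange_one_succ_right (by omega), List.foldl_append, ih]
      have hc : ((4 + j : ℕ) : Int) = 4 + (j : Int) := by push_cast; ring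
      show stepA (dpAux N j) (4 + (j : Int)) = dpAux N (j + 1)
      rw [dpAux, hc]

lemma dpAux_length (N j : ℕ) : (dpAux N j).length = N + 1 := by
  induction j with
  | zero => simp [dpAux, PySem.List.length_pySetD]
  | succ j ih => simpa [dpAux, stepA, PySem.List.length_pySetD] using ih

lemma dpAux_get (N : ℕ) (hN : 3 ≤ N) (j : ℕ) (hj : 3 + j ≤ N) :
    ∀ k : ℕ, k ≤ 3 + j → PySem.List.pyGetD (dpAux N j) (k : Int) 0 = fseq k := by
  induction j with
  | zero =>
      intro k hk
      rw [PySem.List.pyGetD_natCast]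
      have h1 : 1 < N + 1 := by omega
      have h2 : 2 < N + 1 := by omega
      have h3 : 3 < N + 1 := by omega
      simp only [dpAux, PySem.List.pySetD_of_nonneg _ _ (by norm_num : (0:Int) ≤ 1),
        PySem.List.pySetD_of_nonneg _ _ (by norm_num : (0:Int) ≤ 2),
        PySem.List.pySetD_of_nonneg _ _ (by norm_num : (0:Int) ≤ 3)]
      interval_cases k <;>
        simp [List.getD_eq_getElem?_getD, List.length_set, List.length_replicate,
          fseq, h1, h2, h3]
  | succ j ih =>
      intro k hk
      have hj' : 3 + j ≤ N := by omega
      have ih' := ih hj'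
      have hidx : 4 + j < (dpAux N j).length := by rw [dpAux_length]; omega
      show PySem.List.pyGetD (stepA (dpAux N j) ((4 + j : ℕ) : Int)) (k : Int) 0 = fseq k
      unfold stepA
      rw [PySem.List.pyGetD_pySetD_natCast _ (4 + j) k _ _ hidx]
      by_cases hkk : k = 4 + j
      · rw [if_pos hkk]
        have e1 : ((4 + j : ℕ) : Int) - 3 = ((j + 1 : ℕ) : Int) := by push_cast; ring
        have e2 : ((4 + j : ℕ) : Int) - 2 = ((j + 2 : ℕ) : Int) := by push_cast; ring
        have e3 : ((4 + j : ℕ) : Int) - 1 = ((j + 3 : ℕ) : Int) := by push_cast; ring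
        rw [e1, e2, e3, ih' _ (by omega), ih' _ (by omega), ih' _ (by omega)]
        subst hkk
        rw [show 4 + j = j + 4 from by omega]
        show (fseq (j+1) + fseq (j+2) + fseq (j+3)) % 1000000009 = fseq (j+4)
        rfl
      · rw [if_neg hkk]
        exact ih' k (by omega)

lemma solution_eq_fseq (n : Int) (hn : 3 ≤ n) : solution n = fseq n.toNat := by
  have hN : 3 ≤ n.toNat := by omega
  have hn' : n = (n.toNat : Int) := by omega
  rw [solution, if_neg (by omega)]
  show PySem.List.pyGetD
      ((PySem.List.pyRange 4 (n + 1) 1).foldl stepA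
        (PySem.List.pySetD (PySem.List.pySetD (PySem.List.pySetD
          (List.replicate (n + 1).toNat (0 : Int)) 1 1) 2 2) 3 4)) n 0 = fseq n.toNat
  have hlen : (n + 1).toNat = n.toNat + 1 := by omega
  have hup : n + 1 = 4 + ((n.toNat - 3 : ℕ) : Int) := by omega
  rw [hlen, hup]
  rw [show PySem.List.pySetD (PySem.List.pySetD (PySem.List.pySetD
        (List.replicate (n.toNat + 1) (0 : Int)) 1 1) 2 2) 3 4 = dpAux n.toNat 0 from rfl]
  rw [foldl_stepA n.toNat (n.toNat - 3)]
  conv_lhs => rw [hn']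
  exact dpAux_get n.toNat hN (n.toNat - 3) (by omega) n.toNat (by omega)

-- ---------- B side ----------

def toM (m : M3) : Matrix (Fin 3) (Fin 3) (ZMod 1000000009) :=
  !![(m.a : ZMod 1000000009), m.b, m.c; m.d, m.e, m.f; m.g, m.h, m.i]

lemma castmod (x : Int) : ((x % 1000000009 : Int) : ZMod 1000000009) = (x : ZMod 1000000009) := by
  rw [show (1000000009 : Int) = ((1000000009 : ℕ) : Int) from by norm_num, ZMod.intCast_mod]

set_option maxHeartbeats 1000000 in
lemma toM_mmul (x y : M3) : toM (mmul x y) = toM x * toM y := by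
  ext i j
  fin_cases i <;> fin_cases j <;>
    simp [toM, mmul, Matrix.mul_apply, Fin.sum_univ_three, castmod]

lemma toM_matPowAux : ∀ e R A, toM (matPowAux R A e) = toM R * (toM A) ^ e := by
  intro e
  induction e using Nat.strong_induction_on with
  | _ e ih =>
    match e with
    | 0 => intro R A; simp [matPowAux]
    | (e+1) =>
      intro R A
      rw [matPowAux, ih ((e+1)/2) (Nat.div_lt_self (Nat.succ_pos e) (by norm_num))]
      rcases Nat.mod_two_eq_zero_or_one (e+1) with h2 | h2
      · rw [if_neg (by omega), toM_mmul, ← pow_two, ← pow_mul]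
        rw [show 2 * ((e+1)/2) = e + 1 from by omega]
      · rw [if_pos (by omega), toM_mmul, toM_mmul, ← pow_two, ← pow_mul]
        conv_rhs => rw [show e + 1 = 2 * ((e+1)/2) + 1 from by omega]
        rw [pow_succ', mul_assoc]

def fz (k : ℕ) : ZMod 1000000009 := ((fseq k : Int) : ZMod 1000000009)

def Tz : Matrix (Fin 3) (Fin 3) (ZMod 1000000009) := toM ⟨1,1,1,1,0,0,0,1,0⟩

lemma fz_rec (k : ℕ) : fz (k+4) = fz (k+1) + fz (k+2) + fz (k+3) := by
  show ((fseq (k+4) : Int) : ZMod 1000000009) = _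
  rw [show fseq (k+4) = (fseq (k+1) + fseq (k+2) + fseq (k+3)) % 1000000009 from rfl, castmod]
  push_cast
  rfl

lemma Tz_pow_vec (e : ℕ) :
    (Tz ^ e).mulVec ![4, 2, 1] = ![fz (e+3), fz (e+2), fz (e+1)] := by
  induction e with
  | zero =>
      simp only [pow_zero, Matrix.one_mulVec]
      funext i; fin_cases i <;> simp [fz, fseq]
  | succ e ih =>
      rw [pow_succ', ← Matrix.mulVec_mulVec, ih]
      funext i
      fin_cases i <;>
        simp [Tz, toM, Matrix.mulVec, dotProduct, Fin.sum_univ_three]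
      rw [show e + 1 + 3 = e + 4 from rfl, fz_rec]; ring

lemma cast_inj_of_lt (x y : Int) (hx0 : 0 ≤ x) (hx : x < 1000000009)
    (hy0 : 0 ≤ y) (hy : y < 1000000009)
    (h : (x : ZMod 1000000009) = (y : ZMod 1000000009)) : x = y := by
  have hmod : x % 1000000009 = y % 1000000009 := by
    have := (ZMod.intCast_eq_intCast_iff x y 1000000009).mp h
    simpa [Int.ModEq] using this
  rwa [Int.emod_eq_of_lt hx0 hx, Int.emod_eq_of_lt hy0 hy] at hmod

lemma toM_one : toM ⟨1,0,0,0,1,0,0,0,1⟩ = 1 := by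
  ext i j
  fin_cases i <;> fin_cases j <;> simp [toM]

lemma solution_alt_eq_fseq (n : Int) (hn : 3 ≤ n) : solution_alt n = fseq n.toNat := by
  rw [solution_alt, if_neg (by omega)]
  set e := (n - 3).toNat with he
  set P := matPowAux ⟨1,0,0,0,1,0,0,0,1⟩ ⟨1,1,1,1,0,0,0,1,0⟩ e with hP
  have hn3 : n.toNat = e + 3 := by omega
  have hPz : toM P = Tz ^ e := by
    rw [hP, toM_matPowAux, toM_one, one_mul]
    rfl
  have hv := congrFun (Tz_pow_vec e) 0
  simp only [Matrix.mulVec, dotProduct, Fin.sum_univ_three] at hv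
  have hcast : (((4 * P.a + 2 * P.b + P.c) % 1000000009 : Int) : ZMod 1000000009)
      = ((fseq (e + 3) : Int) : ZMod 1000000009) := by
    rw [castmod]
    push_cast
    have h0 : (Tz ^ e) 0 0 = (P.a : ZMod 1000000009) := by rw [← hPz]; simp [toM]
    have h1 : (Tz ^ e) 0 1 = (P.b : ZMod 1000000009) := by rw [← hPz]; simp [toM]
    have h2 : (Tz ^ e) 0 2 = (P.c : ZMod 1000000009) := by rw [← hPz]; simp [toM]
    have := hv
    rw [h0, h1, h2] at this
    simp only [Matrix.cons_val_zero, Matrix.cons_val_one] at this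
    calc (4 : ZMod 1000000009) * P.a + 2 * P.b + P.c
        = (P.a : ZMod 1000000009) * 4 + P.b * 2 + P.c * 1 := by ring
      _ = fz (e + 3) := this
      _ = ((fseq (e + 3) : Int) : ZMod 1000000009) := rfl
  have heq : (4 * P.a + 2 * P.b + P.c) % 1000000009 = fseq (e + 3) := by
    apply cast_inj_of_lt
    · exact Int.emod_nonneg _ (by norm_num)
    · exact Int.emod_lt_of_pos _ (by norm_num)
    · exact fseq_nonneg _ (by omega)
    · exact fseq_lt _ (by omega)
    · exact hcast
  rw [hn3, heq]

-- ===== VERDICT (by name: the statement is the Claim_ definition above) =====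
theorem solution_spec : Claim_equal_solution := by
  intro n _ hpre
  have hpre' : (0 : Int) ≤ n := hpre
  unfold Spec_solution
  by_cases h : n = 0 ∨ n = 1 ∨ n = 2
  · simp [solution, solution_alt, h]
  · have hn : 3 ≤ n := by
      rcases (not_or.mp h) with ⟨h0, h12⟩
      rcases (not_or.mp h12) with ⟨h1, h2⟩
      omega
    rw [solution_eq_fseq n hn, solution_alt_eq_fseq n hn]
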